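-- pv_equiv track=rewrite | github.com/Ramesh6421/DSA | Graphs/L30. Word Ladder - 2 ( All Possible Shortest Sequences ).py | wordLadder_Shortest_Sequences
-- ===== SOURCE A (Python) =====
-- def wordLadder_Shortest_Sequences(startWord, targetWord, wordList):
--     q=[]
--     q.append([startWord])
--     st=set(wordList)
--     if startWord in st:
--         st.remove(startWord)
--     usedonlevel=[startWord]
--     ans=[]
--     level=0
--     while q:
--         cur=q.pop(0)
--         if len(cur)>level:
--             level+=1
--             for it in usedonlevel:
--                 if it in st:
--                     st.remove(it)
--             usedonlevel=[]
--
--         word=cur[-1]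
--         if word==targetWord:
--             if len(ans)==0:
--                 ans.append(cur)
--             elif len(ans[0])==len(cur):
--                 ans.append(cur)
--
--         word=list(word)
--         for i in range(len(word)):
--             original=word[i]
--             for j in range(97,123):
--                 word[i]=chr(j)
--                 dup=''.join(word)
--                 if dup in st:
--                     usedonlevel.append(dup)
--                     cur.append(dup)
--
--                     x=cur.copy()
--                     q.append(x)
--                     cur.pop()
--             word[i]=original
--
--     return ans
-- ===== SOURCE B (Python) =====
-- def wordLadder_Shortest_Sequences(startWord, targetWord, wordList):
--     # Level-synchronized BFS over whole frontiers with early return at the first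
--     # level containing targetWord (A keeps scanning its queue to exhaustion).
--     st = set(wordList)
--     st.discard(startWord)
--     frontier = [[startWord]]
--     while frontier:
--         hits = [p for p in frontier if p[-1] == targetWord]
--         if hits:
--             return hits
--         used = []
--         nxt = []
--         for p in frontier:
--             w = p[-1]
--             for i in range(len(w)):
--                 for j in range(97, 123):
--                     dup = w[:i] + chr(j) + w[i + 1:]
--                     if dup in st:
--                         used.append(dup)
--                         nxt.append(p + [dup])
--         for u in used:
--             st.discard(u)
--         frontier = nxt
--     return []
-- ===== Notes on version B (the rewrite author's own statement) =====
-- stated objective: faster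
-- what changed: A runs one FIFO queue of whole paths with pop(0) shifting, in-queue level detection via path length, a usedonlevel list and a same-length check on ans, and keeps scanning the queue to exhaustion after the target level; B does a level-synchronized BFS over whole frontiers (no queue, no level counter), collects the hit paths of a level with one filter and returns them at the first level containing targetWord, removing each level's used words from the word set in one pass.
import Mathlib
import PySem

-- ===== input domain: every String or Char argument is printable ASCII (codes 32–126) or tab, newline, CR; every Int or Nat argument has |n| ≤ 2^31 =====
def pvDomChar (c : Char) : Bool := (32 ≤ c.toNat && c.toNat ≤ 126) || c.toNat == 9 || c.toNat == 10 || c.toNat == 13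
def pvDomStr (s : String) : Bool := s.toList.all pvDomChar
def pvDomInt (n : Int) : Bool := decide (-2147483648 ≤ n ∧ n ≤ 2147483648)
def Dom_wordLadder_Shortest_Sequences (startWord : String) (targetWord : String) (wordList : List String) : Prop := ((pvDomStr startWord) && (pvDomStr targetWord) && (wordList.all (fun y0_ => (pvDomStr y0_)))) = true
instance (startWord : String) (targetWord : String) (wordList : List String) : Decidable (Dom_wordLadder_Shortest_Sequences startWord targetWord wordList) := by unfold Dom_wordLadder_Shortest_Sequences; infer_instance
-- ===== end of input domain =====

-- B replaces A's single FIFO queue of paths (with in-queue level detection and a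
-- scan of the whole queue to exhaustion) by a level-synchronized frontier BFS that
-- returns at the first level containing targetWord; same return value, no mutation.

-- ===== PORT A =====
-- Literal port of A's while-loop; `fuel` only makes the recursion structural and is
-- provably never exhausted from the entry point below (see pvRunA_eq_pvRunB).
def pvRunA (target : String) : Nat → List (List String) → PySem.Set String →
    List String → List (List String) → Nat → List (List String)
  | 0, _, _, _, ans, _ => ans
  | _+1, [], _, _, ans, _ => ans
  | f+1, cur :: qs, st, usedonlevel, ans, level =>
    -- if len(cur) > level: level += 1; remove usedonlevel from st; usedonlevel = []
    let su := if cur.length > level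
      then (usedonlevel.foldl (fun s it => if PySem.Set.contains s it then PySem.Set.discard s it else s) st,
            ([] : List String), level + 1)
      else (st, usedonlevel, level)
    let st2 := su.1
    let used2 := su.2.1
    let level2 := su.2.2
    let word := PySem.List.pyGetD cur (-1) ""   -- cur[-1]; cur is never empty in reachable states
    let ans2 := if word == target then
        (if ans.length == 0 then ans ++ [cur]
         else if (PySem.List.pyGetD ans 0 []).length == cur.length then ans ++ [cur] else ans)
      else ans
    let nu := (List.range word.toList.length).foldl
        (fun (acc : List (List String) × List String) i =>
          (List.range' 97 26).foldl
            (fun (acc : List (List String) × List String) j =>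
              let dup := String.ofList (word.toList.set i (Char.ofNat j))
              if PySem.Set.contains st2 dup then (acc.1 ++ [cur ++ [dup]], acc.2 ++ [dup]) else acc)
            acc)
        (qs, used2)
    pvRunA target f nu.1 st2 nu.2 ans2 level2

def wordLadder_Shortest_Sequences (startWord : String) (targetWord : String) (wordList : List String) : List (List String) :=
  let st0 := PySem.Set.ofList wordList
  let st := if PySem.Set.contains st0 startWord then PySem.Set.discard st0 startWord else st0
  pvRunA targetWord ((26 * startWord.toList.length + 1) ^ (wordList.length + 2)) [[startWord]] st [startWord] [] 0

-- ===== PORT B =====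
-- Literal port of B's frontier loop; `fuel` (one unit per level) only makes the
-- recursion structural and is provably never exhausted from the entry point.
def pvRunB (target : String) : Nat → PySem.Set String → List (List String) → List (List String)
  | 0, _, _ => []
  | f+1, st, frontier =>
    if frontier.isEmpty then [] else
    let hits := frontier.filter (fun p => PySem.List.pyGetD p (-1) "" == target)
    if hits.isEmpty then
      let nu := frontier.foldl
        (fun (acc : List (List String) × List String) p =>
          let w := (PySem.List.pyGetD p (-1) "").toList
          (List.range w.length).foldl
            (fun (acc : List (List String) × List String) i =>
              (List.range' 97 26).foldl
                (fun (acc : List (List String) × List String) j =>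
                  let dup := String.ofList (w.take i ++ Char.ofNat j :: w.drop (i+1))
                  if PySem.Set.contains st dup then (acc.1 ++ [p ++ [dup]], acc.2 ++ [dup]) else acc)
                acc)
            acc)
        ([], [])
      pvRunB target f (nu.2.foldl PySem.Set.discard st) nu.1
    else hits

def wordLadder_Shortest_Sequences_alt (startWord : String) (targetWord : String) (wordList : List String) : List (List String) :=
  let st := PySem.Set.discard (PySem.Set.ofList wordList) startWord
  pvRunB targetWord (wordList.length + 2) st [[startWord]]

-- ===== PRECONDITION & SPEC =====
def Spec_wordLadder_Shortest_Sequences (startWord : String) (targetWord : String) (wordList : List String) (out : List (List String)) : Prop := out = wordLadder_Shortest_Sequences_alt startWord targetWord wordList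
instance (startWord : String) (targetWord : String) (wordList : List String) (out : List (List String)) : Decidable (Spec_wordLadder_Shortest_Sequences startWord targetWord wordList out) := by unfold Spec_wordLadder_Shortest_Sequences; infer_instance

-- ===== CLAIM (what is proved, stated in full; the proofs are below) =====
def Claim_equal_wordLadder_Shortest_Sequences : Prop := ∀ (startWord : String) (targetWord : String) (wordList : List String), Dom_wordLadder_Shortest_Sequences startWord targetWord wordList → Spec_wordLadder_Shortest_Sequences startWord targetWord wordList (wordLadder_Shortest_Sequences startWord targetWord wordList)

-- ===== LEMMAS AND PROOFS =====

-- Spec-side vocabulary (proof helpers only).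
def pvLast (p : List String) : String := PySem.List.pyGetD p (-1) ""
def pvDups (w : List Char) : List String :=
  (List.range w.length).flatMap (fun i => (List.range' 97 26).map (fun j => String.ofList (w.set i (Char.ofNat j))))
def pvCands (st : PySem.Set String) (w : List Char) : List String :=
  (pvDups w).filter (fun d => PySem.Set.contains st d)
def pvNxt (st : PySem.Set String) (F : List (List String)) : List (List String) :=
  F.flatMap (fun p => (pvCands st (pvLast p).toList).map (fun d => p ++ [d]))
def pvUsedF (st : PySem.Set String) (F : List (List String)) : List String :=
  F.flatMap (fun p => pvCands st (pvLast p).toList)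
def pvRemoveAll (st : PySem.Set String) (used : List String) : PySem.Set String :=
  used.foldl (fun s it => if PySem.Set.contains s it then PySem.Set.discard s it else s) st
def pvAnsStep (t : String) (ans : List (List String)) (cur : List String) : List (List String) :=
  if pvLast cur == t then
    (if ans.length == 0 then ans ++ [cur]
     else if (PySem.List.pyGetD ans 0 []).length == cur.length then ans ++ [cur] else ans)
  else ans
def pvHits (t : String) (F : List (List String)) : List (List String) :=
  F.filter (fun p => PySem.List.pyGetD p (-1) "" == t)

theorem pvPairFold {α β γ : Type} (l : List α) (cond : α → Bool) (f : α → List β) (g : α → List γ)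
    (a : List β) (b : List γ) :
    l.foldl (fun acc x => if cond x then (acc.1 ++ f x, acc.2 ++ g x) else acc) (a, b)
      = (a ++ (l.filter cond).flatMap f, b ++ (l.filter cond).flatMap g) := by
  induction l generalizing a b with
  | nil => simp
  | cons x xs ih =>
    by_cases h : cond x <;> simp [h, ih]

theorem pvExpandA (st : PySem.Set String) (cur : List String) (w : List Char)
    (q : List (List String)) (used : List String) :
    (List.range w.length).foldl
        (fun (acc : List (List String) × List String) i =>
          (List.range' 97 26).foldl
            (fun (acc : List (List String) × List String) j =>
              if PySem.Set.contains st (String.ofList (w.set i (Char.ofNat j))) then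
                (acc.1 ++ [cur ++ [String.ofList (w.set i (Char.ofNat j))]],
                 acc.2 ++ [String.ofList (w.set i (Char.ofNat j))])
              else acc)
            acc)
        (q, used)
      = (q ++ (pvCands st w).map (fun d => cur ++ [d]), used ++ pvCands st w) := by
  have h := pvPairFold (pvDups w) (fun d => PySem.Set.contains st d)
    (fun d => [cur ++ [d]]) (fun d => [d]) q used
  simp only [pvDups, List.foldl_flatMap, List.foldl_map] at h
  rw [h]
  simp [pvCands, pvDups, ← List.map_eq_flatMap]

theorem pvExpandB (st : PySem.Set String) (p : List String) (w : List Char)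
    (a : List (List String)) (b : List String) :
    (List.range w.length).foldl
        (fun (acc : List (List String) × List String) i =>
          (List.range' 97 26).foldl
            (fun (acc : List (List String) × List String) j =>
              if PySem.Set.contains st (String.ofList (w.take i ++ Char.ofNat j :: w.drop (i+1))) then
                (acc.1 ++ [p ++ [String.ofList (w.take i ++ Char.ofNat j :: w.drop (i+1))]],
                 acc.2 ++ [String.ofList (w.take i ++ Char.ofNat j :: w.drop (i+1))])
              else acc)
            acc)
        (a, b)
      = (a ++ (pvCands st w).map (fun d => p ++ [d]), b ++ pvCands st w) := by
  rw [PySem.List.foldl_congr_mem (List.range w.length) _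
    (fun (acc : List (List String) × List String) i =>
      (List.range' 97 26).foldl
        (fun (acc : List (List String) × List String) j =>
          if PySem.Set.contains st (String.ofList (w.set i (Char.ofNat j))) then
            (acc.1 ++ [p ++ [String.ofList (w.set i (Char.ofNat j))]],
             acc.2 ++ [String.ofList (w.set i (Char.ofNat j))])
          else acc)
        acc)
    (a, b) ?_]
  · exact pvExpandA st p w a b
  · intro acc i hi
    have hi' : i < w.length := List.mem_range.mp hi
    apply PySem.List.foldl_congr_mem
    intro acc2 j hj
    rw [List.set_eq_take_cons_drop _ hi']

theorem pvIfDiscard (s : PySem.Set String) (it : String) :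
    (if PySem.Set.contains s it then PySem.Set.discard s it else s) = PySem.Set.discard s it := by
  split
  · rfl
  · next h =>
    have hmem : it ∉ s := fun hm => h ((PySem.Set.contains_iff s it).mpr hm)
    unfold PySem.Set.discard
    exact (List.filter_eq_self.mpr (fun y hy => by
      simp only [Bool.not_eq_eq_eq_not, Bool.not_true, beq_eq_false_iff_ne]
      exact fun he => hmem (he ▸ hy))).symm

theorem pvRemoveAll_eq_filter (st : PySem.Set String) (used : List String) :
    pvRemoveAll st used = st.filter (fun y => !(used.contains y)) := by
  unfold pvRemoveAll
  simp only [pvIfDiscard]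
  induction used generalizing st with
  | nil => simp
  | cons u us ih =>
    simp only [List.foldl_cons, ih]
    unfold PySem.Set.discard
    rw [List.filter_filter]
    apply List.filter_congr
    intro y _
    by_cases h : y = u <;> simp [h, Bool.and_comm]

theorem pvRemoveAll_length_le (st : PySem.Set String) (used : List String) :
    (pvRemoveAll st used).length ≤ st.length := by
  rw [pvRemoveAll_eq_filter]; exact List.length_filter_le _ _

theorem pvRemoveAll_length_lt (st : PySem.Set String) (used : List String) (u : String)
    (h1 : u ∈ st) (h2 : u ∈ used) : (pvRemoveAll st used).length < st.length := by
  rw [pvRemoveAll_eq_filter, List.length_filter_lt_length_iff_exists]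
  exact ⟨u, h1, by simp [h2]⟩

theorem pvRemoveAll_eq_foldl_discard (st : PySem.Set String) (used : List String) :
    pvRemoveAll st used = used.foldl PySem.Set.discard st := by
  unfold pvRemoveAll
  simp only [pvIfDiscard]

theorem pvRemoveAll_singleton (st : PySem.Set String) (x : String) :
    pvRemoveAll st [x] = PySem.Set.discard st x := by
  rw [pvRemoveAll_eq_foldl_discard]; rfl

theorem pvInitSt (wl : List String) (s : String) :
    pvRemoveAll
        (if PySem.Set.contains (PySem.Set.ofList wl) s then PySem.Set.discard (PySem.Set.ofList wl) s
         else PySem.Set.ofList wl) [s]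
      = PySem.Set.discard (PySem.Set.ofList wl) s := by
  rw [pvRemoveAll_singleton]
  split
  · unfold PySem.Set.discard
    rw [List.filter_filter]
    apply List.filter_congr
    intro y _
    simp
  · rfl

theorem pvDups_length (w : List Char) : (pvDups w).length = w.length * 26 := by
  simp [pvDups, List.length_flatMap, List.map_const']

theorem pvMem_dups_length (w : List Char) (d : String) (hd : d ∈ pvDups w) :
    d.toList.length = w.length := by
  simp only [pvDups, List.mem_flatMap, List.mem_map, List.mem_range] at hd
  obtain ⟨i, _, j, _, rfl⟩ := hd
  simp [String.toList_ofList]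

theorem pvCands_length (st : PySem.Set String) (w : List Char) :
    (pvCands st w).length ≤ w.length * 26 := by
  calc (pvCands st w).length ≤ (pvDups w).length := List.length_filter_le _ _
    _ = w.length * 26 := pvDups_length w

theorem pvMem_cands (st : PySem.Set String) (w : List Char) (d : String) (hd : d ∈ pvCands st w) :
    d ∈ st ∧ d.toList.length = w.length := by
  unfold pvCands at hd
  refine ⟨?_, pvMem_dups_length w d (List.mem_of_mem_filter hd)⟩
  have := List.of_mem_filter hd
  exact (PySem.Set.contains_iff st d).mp this

theorem pvNxt_nil_iff (st : PySem.Set String) (F : List (List String)) :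
    pvNxt st F = [] ↔ pvUsedF st F = [] := by
  simp [pvNxt, pvUsedF, List.flatMap_eq_nil_iff]

theorem pvUsedF_mem_st (st : PySem.Set String) (F : List (List String)) (u : String)
    (hu : u ∈ pvUsedF st F) : u ∈ st := by
  simp only [pvUsedF, List.mem_flatMap] at hu
  obtain ⟨p, _, hc⟩ := hu
  exact (pvMem_cands st _ u hc).1

theorem pvNxt_length (st : PySem.Set String) (F : List (List String)) (L : Nat)
    (hL : ∀ p ∈ F, (pvLast p).toList.length = L) :
    (pvNxt st F).length ≤ F.length * (26 * L) := by
  induction F with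
  | nil => simp [pvNxt]
  | cons p F' ih =>
    have h1 : (pvCands st (pvLast p).toList).length ≤ 26 * L := by
      have := pvCands_length st (pvLast p).toList
      rw [hL p (List.mem_cons_self)] at this
      omega
    have h2 := ih (fun q hq => hL q (List.mem_cons_of_mem _ hq))
    simp only [pvNxt, List.flatMap_cons, List.length_append, List.length_map] at *
    calc (pvCands st (pvLast p).toList).length +
          (List.flatMap (fun p => List.map (fun d => p ++ [d]) (pvCands st (pvLast p).toList)) F').length
        ≤ 26 * L + F'.length * (26 * L) := by omega
      _ = (p :: F').length * (26 * L) := by simp [List.length_cons]; ring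

theorem pvNxt_inv (st : PySem.Set String) (F : List (List String)) (L ℓ : Nat)
    (hlen : ∀ p ∈ F, p.length = ℓ) (hL : ∀ p ∈ F, (pvLast p).toList.length = L) :
    ∀ p' ∈ pvNxt st F, p'.length = ℓ + 1 ∧ (pvLast p').toList.length = L := by
  intro p' hp'
  simp only [pvNxt, List.mem_flatMap, List.mem_map] at hp'
  obtain ⟨p, hp, d, hd, rfl⟩ := hp'
  have hcl := (pvMem_cands st _ d hd).2
  constructor
  · simp [List.length_append, hlen p hp]
  · unfold pvLast
    rw [PySem.List.pyGetD_neg_one_append_singleton]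
    rw [hcl, hL p hp]

theorem pvAnsFold_collect (t : String) (ℓ : Nat) :
    ∀ (F : List (List String)) (ans : List (List String)),
      (∀ p ∈ F, p.length = ℓ) →
      (ans = [] ∨ ((PySem.List.pyGetD ans 0 []).length = ℓ ∧ ans ≠ [])) →
      F.foldl (pvAnsStep t) ans = ans ++ pvHits t F := by
  intro F
  induction F with
  | nil => intro ans _ _; simp [pvHits]
  | cons p F' ih =>
    intro ans hF hans
    have hpl : p.length = ℓ := hF p List.mem_cons_self
    have hF' : ∀ q ∈ F', q.length = ℓ := fun q hq => hF q (List.mem_cons_of_mem _ hq)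
    simp only [List.foldl_cons, pvHits, List.filter_cons]
    by_cases hpt : (PySem.List.pyGetD p (-1) "" == t) = true
    · rw [if_pos hpt]
      rcases hans with rfl | ⟨hh, hne⟩
      · have : pvAnsStep t [] p = [p] := by simp [pvAnsStep, pvLast, hpt]
        rw [this, ih [p] hF' (Or.inr ⟨by simpa [PySem.List.pyGetD_zero_cons] using hpl, by simp⟩)]
        simp [pvHits]
      · obtain ⟨a, as, rfl⟩ : ∃ a as, ans = a :: as := by
          cases ans with
          | nil => exact absurd rfl hne
          | cons a as => exact ⟨a, as, rfl⟩
        have : pvAnsStep t (a :: as) p = (a :: as) ++ [p] := by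
          simp only [pvAnsStep, pvLast, hpt, if_pos]
          have hlen0 : ((a :: as).length == 0) = false := by simp
          rw [hlen0]
          simp only [Bool.false_eq_true, if_false]
          have : ((PySem.List.pyGetD (a :: as) 0 []).length == p.length) = true := by
            simp only [PySem.List.pyGetD_zero_cons] at hh ⊢
            simp [hh, hpl]
          rw [this]
          simp
        rw [this, ih ((a :: as) ++ [p]) hF' (Or.inr ⟨by
            simpa [PySem.List.pyGetD_zero_cons] using hh, by simp⟩)]
        simp [pvHits]
    · rw [if_neg hpt]
      have : pvAnsStep t ans p = ans := by simp [pvAnsStep, pvLast, hpt]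
      rw [this, ih ans hF' hans]; rfl

theorem pvAnsFold_keep (t : String) :
    ∀ (F : List (List String)) (ans : List (List String)),
      ans ≠ [] →
      (∀ p ∈ F, (PySem.List.pyGetD ans 0 []).length ≠ p.length) →
      F.foldl (pvAnsStep t) ans = ans := by
  intro F
  induction F with
  | nil => intro ans _ _; rfl
  | cons p F' ih =>
    intro ans hne hF
    have : pvAnsStep t ans p = ans := by
      unfold pvAnsStep
      split
      · have hlen0 : (ans.length == 0) = false := by
          simp [List.length_eq_zero_iff, hne]
        rw [hlen0]
        simp only [Bool.false_eq_true, if_false]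
        have : ((PySem.List.pyGetD ans 0 []).length == p.length) = false := by
          simp [hF p List.mem_cons_self]
        rw [this]
        simp
      · rfl
    simp only [List.foldl_cons, this]
    exact ih ans hne (fun q hq => hF q (List.mem_cons_of_mem _ hq))

theorem pvRunA_step (t : String) (f : Nat) (cur : List String) (qs : List (List String))
    (st : PySem.Set String) (used : List String) (ans : List (List String)) (level : Nat)
    (h : ¬ cur.length > level) :
    pvRunA t (f+1) (cur::qs) st used ans level
      = pvRunA t f
          (qs ++ (pvCands st (PySem.List.pyGetD cur (-1) "").toList).map (fun d => cur ++ [d]))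
          st (used ++ pvCands st (PySem.List.pyGetD cur (-1) "").toList)
          (pvAnsStep t ans cur) level := by
  simp only [pvRunA]
  rw [if_neg h]
  rw [pvExpandA st cur ((PySem.List.pyGetD cur (-1) "").toList) qs used]
  rfl

theorem pvRunA_boundary (t : String) (f : Nat) (p : List String) (q : List (List String))
    (st : PySem.Set String) (used : List String) (ans : List (List String)) (level : Nat)
    (h : p.length = level + 1) :
    pvRunA t (f+1) (p::q) st used ans level
      = pvRunA t (f+1) (p::q) (pvRemoveAll st used) [] ans (level+1) := by
  have c1 : p.length > level := by omega
  have c2 : ¬ p.length > level + 1 := by omega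
  simp only [pvRunA, pvRemoveAll]
  rw [if_pos c1, if_neg c2]

theorem pvRunA_level (t : String) (lv : Nat) :
    ∀ (F G : List (List String)) (st : PySem.Set String) (used : List String)
      (ans : List (List String)) (f : Nat),
      (∀ p ∈ F, p.length = lv) →
      pvRunA t (F.length + f) (F ++ G) st used ans lv
        = pvRunA t f (G ++ pvNxt st F) st (used ++ pvUsedF st F) (F.foldl (pvAnsStep t) ans) lv := by
  intro F
  induction F with
  | nil => intro G st used ans f _; simp [pvNxt, pvUsedF]
  | cons p F' ih =>
    intro G st used ans f hF
    have hpl : p.length = lv := hF p List.mem_cons_self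
    rw [List.length_cons, Nat.add_right_comm, List.cons_append]
    rw [pvRunA_step t (F'.length + f) p (F' ++ G) st used ans lv (by omega)]
    rw [List.append_assoc]
    rw [ih (G ++ (pvCands st (PySem.List.pyGetD p (-1) "").toList).map (fun d => p ++ [d]))
        st (used ++ pvCands st (PySem.List.pyGetD p (-1) "").toList) (pvAnsStep t ans p) f
        (fun q hq => hF q (List.mem_cons_of_mem _ hq))]
    simp only [pvNxt, pvUsedF, pvLast, List.flatMap_cons, List.append_assoc, List.foldl_cons]

theorem pvRunA_nil (t : String) (f : Nat) (st : PySem.Set String) (used : List String)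
    (ans : List (List String)) (level : Nat) : pvRunA t f [] st used ans level = ans := by
  cases f <;> rfl

theorem pvFrontierFoldB (st : PySem.Set String) :
    ∀ (F : List (List String)) (a : List (List String)) (b : List String),
      F.foldl (fun (acc : List (List String) × List String) p =>
        (List.range (PySem.List.pyGetD p (-1) "").toList.length).foldl
          (fun (acc : List (List String) × List String) i =>
            (List.range' 97 26).foldl
              (fun (acc : List (List String) × List String) j =>
                if PySem.Set.contains st (String.ofList ((PySem.List.pyGetD p (-1) "").toList.take i ++ Char.ofNat j :: (PySem.List.pyGetD p (-1) "").toList.drop (i+1))) then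
                  (acc.1 ++ [p ++ [String.ofList ((PySem.List.pyGetD p (-1) "").toList.take i ++ Char.ofNat j :: (PySem.List.pyGetD p (-1) "").toList.drop (i+1))]],
                   acc.2 ++ [String.ofList ((PySem.List.pyGetD p (-1) "").toList.take i ++ Char.ofNat j :: (PySem.List.pyGetD p (-1) "").toList.drop (i+1))])
                else acc)
              acc)
          acc) (a, b)
        = (a ++ pvNxt st F, b ++ pvUsedF st F) := by
  intro F
  induction F with
  | nil => intro a b; simp [pvNxt, pvUsedF]
  | cons p F' ih =>
    intro a b
    simp only [List.foldl_cons]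
    rw [pvExpandB st p ((PySem.List.pyGetD p (-1) "").toList) a b]
    rw [ih]
    simp [pvNxt, pvUsedF, pvLast, List.flatMap_cons, List.append_assoc]

theorem pvRunB_nil (t : String) (f : Nat) (st : PySem.Set String) :
    pvRunB t f st [] = [] := by
  cases f <;> rfl

theorem pvRunB_hits (t : String) (f : Nat) (st : PySem.Set String) (F : List (List String))
    (hne : F ≠ []) (hhits : pvHits t F ≠ []) : pvRunB t (f+1) st F = pvHits t F := by
  simp only [pvRunB]
  rw [show F.isEmpty = false from by simp [hne]]
  rw [show (List.filter (fun p => PySem.List.pyGetD p (-1) "" == t) F).isEmpty = false from by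
    simpa [List.isEmpty_eq_false_iff, pvHits] using hhits]
  rfl

theorem pvRunB_step (t : String) (f : Nat) (st : PySem.Set String) (F : List (List String))
    (hne : F ≠ []) (hhits : pvHits t F = []) :
    pvRunB t (f+1) st F = pvRunB t f (pvRemoveAll st (pvUsedF st F)) (pvNxt st F) := by
  simp only [pvRunB]
  rw [show F.isEmpty = false from by simp [hne]]
  rw [show (List.filter (fun p => PySem.List.pyGetD p (-1) "" == t) F).isEmpty = true from by
    simp [show List.filter (fun p => PySem.List.pyGetD p (-1) "" == t) F = [] from hhits]]
  simp only [Bool.false_eq_true, if_false, if_true]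
  rw [pvFrontierFoldB st F [] []]
  simp only [List.nil_append]
  rw [← pvRemoveAll_eq_foldl_discard]

theorem pvFuelArith (E P n m : Nat) (hE : 1 ≤ E) (hP : 1 ≤ P) (h : n * (E * P) ≤ m) :
    n ≤ m ∧ n * ((E - 1) * P) ≤ m - n := by
  obtain ⟨e, rfl⟩ : ∃ e, E = e + 1 := ⟨E - 1, by omega⟩
  rw [show n * ((e + 1) * P) = n * (e * P) + n * P from by ring] at h
  have h2 : n ≤ n * P := Nat.le_mul_of_pos_right n (by omega)
  rw [show e + 1 - 1 = e from by omega]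
  revert h h2
  generalize n * (e * P) = A
  generalize n * P = B
  intro h h2
  omega

theorem pvStops (t : String) (L : Nat) :
    ∀ (s : Nat) (st : PySem.Set String) (used : List String) (F ans : List (List String))
      (level fA : Nat),
      (pvRemoveAll st used).length ≤ s →
      (∀ p ∈ F, p.length = level + 1) →
      (∀ p ∈ F, (pvLast p).toList.length = L) →
      F.length * (26 * L + 1) ^ (s + 1) ≤ fA →
      ans ≠ [] →
      (PySem.List.pyGetD ans 0 []).length ≤ level →
      pvRunA t fA F st used ans level = ans := by
  intro s
  induction s using Nat.strong_induction_on with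
  | _ s ih =>
    intro st used F ans level fA hs hlen hlast hfA hne hhead
    rcases F with _ | ⟨p, F'⟩
    · exact pvRunA_nil t fA st used ans level
    · have hE : 1 ≤ 26 * L + 1 := by omega
      have hP : 1 ≤ (26 * L + 1) ^ s := Nat.one_le_pow _ _ (by omega)
      have hpow : (26 * L + 1) ^ (s + 1) = (26 * L + 1) * (26 * L + 1) ^ s := by
        rw [pow_succ, Nat.mul_comm]
      obtain ⟨h1, h2⟩ := pvFuelArith (26 * L + 1) ((26 * L + 1) ^ s) (p :: F').length fA hE hP
        (by rw [← hpow]; exact hfA)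
      rw [show 26 * L + 1 - 1 = 26 * L from by omega] at h2
      have hlenp : (p :: F').length = F'.length + 1 := by simp
      obtain ⟨g, rfl⟩ : ∃ g, fA = g + 1 := ⟨fA - 1, by omega⟩
      rw [pvRunA_boundary t g p F' st used ans level (hlen p List.mem_cons_self)]
      obtain ⟨rest, hrest⟩ : ∃ rest, g + 1 = (p :: F').length + rest :=
        ⟨g + 1 - (p :: F').length, by omega⟩
      rw [hrest]
      have hlev := pvRunA_level t (level + 1) (p :: F') [] (pvRemoveAll st used) [] ans rest hlen
      rw [List.append_nil] at hlev
      rw [hlev]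
      simp only [List.nil_append]
      rw [pvAnsFold_keep t (p :: F') ans hne (fun q hq => by have := hlen q hq; omega)]
      by_cases hN : pvNxt (pvRemoveAll st used) (p :: F') = []
      · rw [hN]; exact pvRunA_nil t rest _ _ ans (level + 1)
      · have hU : pvUsedF (pvRemoveAll st used) (p :: F') ≠ [] :=
          fun h => hN ((pvNxt_nil_iff _ _).mpr h)
        obtain ⟨u, hu⟩ := List.exists_mem_of_ne_nil _ hU
        have hub : u ∈ pvRemoveAll st used := pvUsedF_mem_st _ _ u hu
        have hmlt := pvRemoveAll_length_lt (pvRemoveAll st used) (pvUsedF (pvRemoveAll st used) (p :: F')) u hub hu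
        have hinv := pvNxt_inv (pvRemoveAll st used) (p :: F') L (level + 1) hlen hlast
        apply ih (pvRemoveAll (pvRemoveAll st used) (pvUsedF (pvRemoveAll st used) (p :: F'))).length
          (by omega)
        · exact le_refl _
        · exact fun p' hp' => (hinv p' hp').1
        · exact fun p' hp' => (hinv p' hp').2
        · calc (pvNxt (pvRemoveAll st used) (p :: F')).length *
                (26 * L + 1) ^ ((pvRemoveAll (pvRemoveAll st used) (pvUsedF (pvRemoveAll st used) (p :: F'))).length + 1)
              ≤ ((p :: F').length * (26 * L)) * (26 * L + 1) ^ s :=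
                Nat.mul_le_mul (pvNxt_length _ _ L hlast)
                  (Nat.pow_le_pow_right (by omega) (by omega))
            _ = (p :: F').length * (26 * L * (26 * L + 1) ^ s) := by ring
            _ ≤ (g + 1) - (p :: F').length := h2
            _ = rest := by omega
        · exact hne
        · omega

theorem pvMain (t : String) (L : Nat) :
    ∀ (s : Nat) (st : PySem.Set String) (used : List String) (F : List (List String))
      (level fA fB : Nat),
      (pvRemoveAll st used).length ≤ s →
      (∀ p ∈ F, p.length = level + 1) →
      (∀ p ∈ F, (pvLast p).toList.length = L) →
      F.length * (26 * L + 1) ^ (s + 1) ≤ fA →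
      s + 2 ≤ fB →
      pvRunA t fA F st used [] level = pvRunB t fB (pvRemoveAll st used) F := by
  intro s
  induction s using Nat.strong_induction_on with
  | _ s ih =>
    intro st used F level fA fB hs hlen hlast hfA hfB
    rcases F with _ | ⟨p, F'⟩
    · rw [pvRunA_nil, pvRunB_nil]
    · have hE : 1 ≤ 26 * L + 1 := by omega
      have hP : 1 ≤ (26 * L + 1) ^ s := Nat.one_le_pow _ _ (by omega)
      have hpow : (26 * L + 1) ^ (s + 1) = (26 * L + 1) * (26 * L + 1) ^ s := by
        rw [pow_succ, Nat.mul_comm]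
      obtain ⟨h1, h2⟩ := pvFuelArith (26 * L + 1) ((26 * L + 1) ^ s) (p :: F').length fA hE hP
        (by rw [← hpow]; exact hfA)
      rw [show 26 * L + 1 - 1 = 26 * L from by omega] at h2
      have hlenp : (p :: F').length = F'.length + 1 := by simp
      obtain ⟨g, rfl⟩ : ∃ g, fA = g + 1 := ⟨fA - 1, by omega⟩
      obtain ⟨k, rfl⟩ : ∃ k, fB = k + 1 := ⟨fB - 1, by omega⟩
      rw [pvRunA_boundary t g p F' st used [] level (hlen p List.mem_cons_self)]
      obtain ⟨rest, hrest⟩ : ∃ rest, g + 1 = (p :: F').length + rest :=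
        ⟨g + 1 - (p :: F').length, by omega⟩
      rw [hrest]
      have hlev := pvRunA_level t (level + 1) (p :: F') [] (pvRemoveAll st used) [] [] rest hlen
      rw [List.append_nil] at hlev
      rw [hlev]
      simp only [List.nil_append]
      rw [pvAnsFold_collect t (level + 1) (p :: F') [] hlen (Or.inl rfl)]
      simp only [List.nil_append]
      have hinv := pvNxt_inv (pvRemoveAll st used) (p :: F') L (level + 1) hlen hlast
      by_cases hhits : pvHits t (p :: F') = []
      · rw [hhits]
        rw [pvRunB_step t k (pvRemoveAll st used) (p :: F') (List.cons_ne_nil p F') hhits]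
        by_cases hN : pvNxt (pvRemoveAll st used) (p :: F') = []
        · rw [hN, pvRunA_nil, pvRunB_nil]
        · have hU : pvUsedF (pvRemoveAll st used) (p :: F') ≠ [] :=
            fun h => hN ((pvNxt_nil_iff _ _).mpr h)
          obtain ⟨u, hu⟩ := List.exists_mem_of_ne_nil _ hU
          have hub : u ∈ pvRemoveAll st used := pvUsedF_mem_st _ _ u hu
          have hmlt := pvRemoveAll_length_lt (pvRemoveAll st used)
            (pvUsedF (pvRemoveAll st used) (p :: F')) u hub hu
          apply ih (pvRemoveAll (pvRemoveAll st used) (pvUsedF (pvRemoveAll st used) (p :: F'))).length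
            (by omega)
          · exact le_refl _
          · exact fun p' hp' => (hinv p' hp').1
          · exact fun p' hp' => (hinv p' hp').2
          · calc (pvNxt (pvRemoveAll st used) (p :: F')).length *
                  (26 * L + 1) ^ ((pvRemoveAll (pvRemoveAll st used) (pvUsedF (pvRemoveAll st used) (p :: F'))).length + 1)
                ≤ ((p :: F').length * (26 * L)) * (26 * L + 1) ^ s :=
                  Nat.mul_le_mul (pvNxt_length _ _ L hlast)
                    (Nat.pow_le_pow_right (by omega) (by omega))
              _ = (p :: F').length * (26 * L * (26 * L + 1) ^ s) := by ring
              _ ≤ (g + 1) - (p :: F').length := h2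
              _ = rest := by omega
          · omega
      · rw [pvRunB_hits t k (pvRemoveAll st used) (p :: F') (List.cons_ne_nil p F') hhits]
        obtain ⟨h0, tl, hhd⟩ : ∃ h0 tl, pvHits t (p :: F') = h0 :: tl := by
          cases hc : pvHits t (p :: F') with
          | nil => exact absurd hc hhits
          | cons a b => exact ⟨a, b, rfl⟩
        have hh0 : h0 ∈ (p :: F') := by
          have : h0 ∈ pvHits t (p :: F') := by rw [hhd]; exact List.mem_cons_self
          exact List.mem_of_mem_filter this
        have hhead : (PySem.List.pyGetD (pvHits t (p :: F')) 0 []).length ≤ level + 1 := by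
          rw [hhd, PySem.List.pyGetD_zero_cons]
          rw [hlen h0 hh0]
        by_cases hN : pvNxt (pvRemoveAll st used) (p :: F') = []
        · rw [hN, pvRunA_nil]
        · have hU : pvUsedF (pvRemoveAll st used) (p :: F') ≠ [] :=
            fun h => hN ((pvNxt_nil_iff _ _).mpr h)
          obtain ⟨u, hu⟩ := List.exists_mem_of_ne_nil _ hU
          have hub : u ∈ pvRemoveAll st used := pvUsedF_mem_st _ _ u hu
          have hmlt := pvRemoveAll_length_lt (pvRemoveAll st used)
            (pvUsedF (pvRemoveAll st used) (p :: F')) u hub hu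
          apply pvStops t L
            (pvRemoveAll (pvRemoveAll st used) (pvUsedF (pvRemoveAll st used) (p :: F'))).length
            (pvRemoveAll st used) (pvUsedF (pvRemoveAll st used) (p :: F'))
            (pvNxt (pvRemoveAll st used) (p :: F')) (pvHits t (p :: F')) (level + 1) rest
            (le_refl _)
            (fun p' hp' => (hinv p' hp').1)
            (fun p' hp' => (hinv p' hp').2)
            ?_ hhits hhead
          calc (pvNxt (pvRemoveAll st used) (p :: F')).length *
                  (26 * L + 1) ^ ((pvRemoveAll (pvRemoveAll st used) (pvUsedF (pvRemoveAll st used) (p :: F'))).length + 1)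
              ≤ ((p :: F').length * (26 * L)) * (26 * L + 1) ^ s :=
                Nat.mul_le_mul (pvNxt_length _ _ L hlast)
                  (Nat.pow_le_pow_right (by omega) (by omega))
            _ = (p :: F').length * (26 * L * (26 * L + 1) ^ s) := by ring
            _ ≤ (g + 1) - (p :: F').length := h2
            _ = rest := by omega

theorem pvLast_singleton (x : String) : pvLast [x] = x := by
  unfold pvLast
  simpa using PySem.List.pyGetD_neg_one_append_singleton ([] : List String) x ""

theorem pvStA_length_le (wordList : List String) (startWord : String) :
    (if PySem.Set.contains (PySem.Set.ofList wordList) startWord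
      then PySem.Set.discard (PySem.Set.ofList wordList) startWord
      else PySem.Set.ofList wordList).length ≤ wordList.length := by
  split
  · unfold PySem.Set.discard
    exact le_trans (List.length_filter_le _ _) (PySem.Set.length_ofList_le wordList)
  · exact PySem.Set.length_ofList_le wordList

theorem wordLadder_Shortest_Sequences_spec : Claim_equal_wordLadder_Shortest_Sequences := by
  intro startWord targetWord wordList _
  unfold Spec_wordLadder_Shortest_Sequences
  unfold wordLadder_Shortest_Sequences wordLadder_Shortest_Sequences_alt
  simp only []
  conv_rhs => rw [← pvInitSt wordList startWord]
  have hsle : (pvRemoveAll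
      (if PySem.Set.contains (PySem.Set.ofList wordList) startWord
        then PySem.Set.discard (PySem.Set.ofList wordList) startWord
        else PySem.Set.ofList wordList) [startWord]).length ≤ wordList.length :=
    le_trans (pvRemoveAll_length_le _ _) (pvStA_length_le wordList startWord)
  apply pvMain targetWord startWord.toList.length
    (pvRemoveAll
      (if PySem.Set.contains (PySem.Set.ofList wordList) startWord
        then PySem.Set.discard (PySem.Set.ofList wordList) startWord
        else PySem.Set.ofList wordList) [startWord]).length
  · exact le_refl _
  · intro p hp
    simp only [List.mem_singleton] at hp
    subst hp; rfl
  · intro p hp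
    simp only [List.mem_singleton] at hp
    subst hp
    rw [pvLast_singleton]
  · rw [List.length_singleton, one_mul]
    exact Nat.pow_le_pow_right (by omega) (by omega)
  · omega
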